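-- pv_equiv track=rewrite | github.com/agusmcinnes/distribuidora-lucas | app/powerbi_handler/services.py | _detect_id_field
-- ===== SOURCE A (Python) =====
-- from typing import Dict, List, Optional
--
-- def _detect_id_field(row: dict) -> Optional[str]:
--     """
--     Auto-detecta el campo ID en un registro de Power BI.
--     Busca campos que contengan 'id' en el nombre.
--
--     Prioridad:
--     1. Campo que sea exactamente 'id' o '[id]'
--     2. Campo que termine en '_id' o '[*_id]'
--     3. Campo que contenga 'id' en cualquier parte
--     4. Primer campo del registro (fallback)
--     """
--     if not row:
--         return None
--
--     keys = list(row.keys())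
--
--     # Buscar campo exacto 'id' o '[id]'
--     for key in keys:
--         key_lower = key.lower().strip('[]')
--         if key_lower == 'id':
--             return key
--
--     # Buscar campos que terminen en _id
--     for key in keys:
--         key_lower = key.lower().strip('[]')
--         if key_lower.endswith('_id') or key_lower.endswith('id_'):
--             return key
--
--     # Buscar campos que contengan 'id'
--     for key in keys:
--         key_lower = key.lower()
--         if 'id' in key_lower:
--             return key
--
--     # Fallback: usar el primer campo
--     return keys[0] if keys else None
-- ===== SOURCE B (Python) =====
-- from typing import Optional
--
-- def _detect_id_field(row: dict) -> Optional[str]: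
--     if not row:
--         return None
--     first_exact = first_suffix = first_contains = None
--     for key in row.keys():
--         stripped = key.lower().strip('[]')
--         plain = key.lower()
--         if first_exact is None and stripped == 'id':
--             first_exact = key
--         if first_suffix is None and (stripped.endswith('_id') or stripped.endswith('id_')):
--             first_suffix = key
--         if first_contains is None and 'id' in plain:
--             first_contains = key
--     if first_exact is not None:
--         return first_exact
--     if first_suffix is not None:
--         return first_suffix
--     if first_contains is not None:
--         return first_contains
--     return next(iter(row.keys()))
-- ===== Notes on version B (the rewrite author's own statement) =====
-- stated objective: alternative
-- what changed: Replaces A's three sequential full scans of the keys with a single pass that maintains the first match of each priority tier in three Optional variables and selects among them afterwards.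
import Mathlib
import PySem

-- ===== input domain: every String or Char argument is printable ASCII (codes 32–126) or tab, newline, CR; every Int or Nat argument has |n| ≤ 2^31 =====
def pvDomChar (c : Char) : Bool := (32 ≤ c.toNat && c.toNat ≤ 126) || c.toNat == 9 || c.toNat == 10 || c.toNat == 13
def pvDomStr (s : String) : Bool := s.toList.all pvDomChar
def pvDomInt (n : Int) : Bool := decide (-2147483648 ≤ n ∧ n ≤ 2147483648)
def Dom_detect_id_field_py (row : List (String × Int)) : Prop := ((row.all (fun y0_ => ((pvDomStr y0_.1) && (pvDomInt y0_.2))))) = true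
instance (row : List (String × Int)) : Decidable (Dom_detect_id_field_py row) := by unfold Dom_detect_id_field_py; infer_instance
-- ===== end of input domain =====

-- B replaces A's three sequential scans over the keys by a single pass that records the
-- first match of each priority tier; same results, no speed claim (objective: alternative).

-- ===== PORT A =====
-- A's three for-loops, each returning on the first match, are ported as List.find? over the keys.
def detect_id_field_py (row : List (String × Int)) : Option String :=
  if row.isEmpty then none
  else
    let keys := row.map Prod.fst
    match keys.find? (fun key =>
        let key_lower := PySem.Str.stripChars (PySem.Str.lower key) "[]"
        key_lower == "id") with
    | some key => some key
    | none =>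
      match keys.find? (fun key =>
          let key_lower := PySem.Str.stripChars (PySem.Str.lower key) "[]"
          PySem.Str.endswith key_lower "_id" || PySem.Str.endswith key_lower "id_") with
      | some key => some key
      | none =>
        match keys.find? (fun key => PySem.Str.isIn "id" (PySem.Str.lower key)) with
        | some key => some key
        | none => keys.head?   -- keys[0] if keys else None

-- ===== PORT B =====
-- one loop body: update (first_exact, first_suffix, first_contains)
def bStep (s : Option String × Option String × Option String) (key : String) :
    Option String × Option String × Option String :=
  let stripped := PySem.Str.stripChars (PySem.Str.lower key) "[]"
  let plain := PySem.Str.lower key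
  ( if s.1.isNone && (stripped == "id") then some key else s.1,
    if s.2.1.isNone && (PySem.Str.endswith stripped "_id" || PySem.Str.endswith stripped "id_")
      then some key else s.2.1,
    if s.2.2.isNone && PySem.Str.isIn "id" plain then some key else s.2.2 )

def detect_id_field_py_alt (row : List (String × Int)) : Option String :=
  if row.isEmpty then none
  else
    let keys := row.map Prod.fst
    let s := keys.foldl bStep (none, none, none)
    match s.1 with
    | some k => some k
    | none =>
      match s.2.1 with
      | some k => some k
      | none =>
        match s.2.2 with
        | some k => some k
        | none => keys.head?

-- ===== PRECONDITION & SPEC =====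
def Spec_detect_id_field_py (row : List (String × Int)) (out : Option String) : Prop := out = detect_id_field_py_alt row
instance (row : List (String × Int)) (out : Option String) : Decidable (Spec_detect_id_field_py row out) := by unfold Spec_detect_id_field_py; infer_instance

-- ===== CLAIM (what is proved, stated in full; the proofs are below) =====
def Claim_equal_detect_id_field_py : Prop := ∀ (row : List (String × Int)), Dom_detect_id_field_py row → Spec_detect_id_field_py row (detect_id_field_py row)

-- ===== LEMMAS AND PROOFS =====
def q1 (key : String) : Bool := PySem.Str.stripChars (PySem.Str.lower key) "[]" == "id"
def q2 (key : String) : Bool :=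
  PySem.Str.endswith (PySem.Str.stripChars (PySem.Str.lower key) "[]") "_id" ||
  PySem.Str.endswith (PySem.Str.stripChars (PySem.Str.lower key) "[]") "id_"
def q3 (key : String) : Bool := PySem.Str.isIn "id" (PySem.Str.lower key)

lemma fold_first (p : String → Bool) (keys : List String) (a : Option String) :
    keys.foldl (fun a k => if a.isNone && p k then some k else a) a = a.or (keys.find? p) := by
  induction keys generalizing a with
  | nil => cases a <;> rfl
  | cons k ks ih =>
    rw [List.foldl_cons]
    cases a with
    | some x => exact ih (some x)
    | none =>
      rw [ih]
      cases hp : p k <;> simp [List.find?, hp]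

lemma fold_bStep (keys : List String) (a b c : Option String) :
    keys.foldl bStep (a, b, c) =
      (a.or (keys.find? q1), b.or (keys.find? q2), c.or (keys.find? q3)) := by
  have hsplit : ∀ (ks : List String) (a b c : Option String),
      ks.foldl bStep (a, b, c) =
        (ks.foldl (fun a k => if a.isNone && q1 k then some k else a) a,
         ks.foldl (fun b k => if b.isNone && q2 k then some k else b) b,
         ks.foldl (fun c k => if c.isNone && q3 k then some k else c) c) := by
    intro ks
    induction ks with
    | nil => intro a b c; rfl
    | cons k t ih => intro a b c; simpa only [List.foldl_cons] using ih _ _ _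
  rw [hsplit, fold_first, fold_first, fold_first]

-- ===== VERDICT (by name: the statement is the Claim_ definition above) =====
theorem detect_id_field_py_spec : Claim_equal_detect_id_field_py := by
  intro row _
  unfold Spec_detect_id_field_py detect_id_field_py detect_id_field_py_alt
  by_cases h : row.isEmpty
  · simp [h]
  · simp only [h]
    rw [fold_bStep]
    rfl
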